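-- pv_equiv track=rewrite | github.com/AnshRaj112/CogniMarket | plot_training_loss.py | _loss_columns
-- ===== SOURCE A (Python) =====
-- from typing import Any, Dict, List, Sequence
--
-- def _loss_columns(columns: Sequence[str]) -> List[str]:
--     out: List[str] = []
--     for c in columns:
--         lc = c.lower()
--         if lc == "loss":
--             out.append(c)
--         elif "loss" in lc:
--             out.append(c)
--     # Prioritize the canonical "loss", then keep deterministic order.
--     return sorted(out, key=lambda x: (0 if x.lower() == "loss" else 1, x.lower()))
-- ===== SOURCE B (Python) =====
-- from typing import List, Sequence
--
-- def _loss_columns(columns: Sequence[str]) -> List[str]: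
--     # Online insertion sort: a single pass keeps the output in final order as we go,
--     # inserting each matching column after all entries with a key <= its own (stable).
--     out = []  # (key, original name) pairs, always sorted by key
--     for c in columns:
--         lc = c.lower()
--         if "loss" in lc:
--             k = (0 if lc == "loss" else 1, lc)
--             i = 0
--             while i < len(out) and out[i][0] <= k:
--                 i += 1
--             out.insert(i, (k, c))
--     return [name for _, name in out]
-- ===== Notes on version B (the rewrite author's own statement) =====
-- stated objective: alternative
-- what changed: Replaces A's collect-then-library-sort (building a filtered list and calling sorted with a compound key) by a single-pass online insertion sort that keeps a (key, name) list in final order, inserting each matching column in place as it is scanned.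
import Mathlib
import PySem

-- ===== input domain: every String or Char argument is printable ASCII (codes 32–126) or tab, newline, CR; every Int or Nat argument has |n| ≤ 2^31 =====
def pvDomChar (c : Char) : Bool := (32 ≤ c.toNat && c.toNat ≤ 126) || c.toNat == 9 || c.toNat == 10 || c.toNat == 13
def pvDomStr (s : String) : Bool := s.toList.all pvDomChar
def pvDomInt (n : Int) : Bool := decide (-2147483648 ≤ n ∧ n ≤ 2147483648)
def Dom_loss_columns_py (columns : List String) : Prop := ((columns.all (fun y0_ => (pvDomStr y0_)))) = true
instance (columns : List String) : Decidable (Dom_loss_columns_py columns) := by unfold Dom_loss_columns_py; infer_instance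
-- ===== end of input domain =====

-- B replaces A's collect-then-library-sort by a single-pass online insertion sort that
-- keeps (key, name) pairs in final order while scanning: alternative decomposition, same output.


-- ===== PORT A =====
def loss_columns_py (columns : List String) : List String :=
  let out := columns.foldl (fun out c =>
    let lc := PySem.Str.lower c
    if lc == "loss" then out ++ [c]
    else if PySem.Str.isIn "loss" lc then out ++ [c]
    else out) []
  PySem.List.sorted2 out (fun x => if PySem.Str.lower x == "loss" then (0 : Int) else 1)
    (fun x => PySem.Str.lower x)

-- ===== PORT B =====
-- Python tuple ≤ on (int, str), exactly as `out[i][0] <= k` compares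
def pvKeyLe (a b : Int × String) : Bool :=
  decide (a.1 < b.1) || (a.1 == b.1 && decide (a.2 ≤ b.2))

-- the `while i < len(out) and out[i][0] <= k: i += 1; out.insert(i, (k, c))` step:
-- walk past entries with key ≤ k, place (k, c) there (exact for that scan-and-insert loop)
def pvInsertPair (k : Int × String) (c : String) :
    List ((Int × String) × String) → List ((Int × String) × String)
  | [] => [(k, c)]
  | p :: rest => if pvKeyLe p.1 k then p :: pvInsertPair k c rest else (k, c) :: p :: rest

def loss_columns_py_alt (columns : List String) : List String :=
  let out := columns.foldl (fun out c =>
    let lc := PySem.Str.lower c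
    if PySem.Str.isIn "loss" lc then
      pvInsertPair ((if lc == "loss" then (0 : Int) else 1), lc) c out
    else out) []
  out.map Prod.snd

-- ===== PRECONDITION & SPEC =====
def Spec_loss_columns_py (columns : List String) (out : List String) : Prop := out = loss_columns_py_alt columns
instance (columns : List String) (out : List String) : Decidable (Spec_loss_columns_py columns out) := by unfold Spec_loss_columns_py; infer_instance

-- ===== CLAIM (what is proved, stated in full; the proofs are below) =====
def Claim_equal_loss_columns_py : Prop := ∀ (columns : List String), Dom_loss_columns_py columns → Spec_loss_columns_py columns (loss_columns_py columns)

-- ===== LEMMAS AND PROOFS =====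

-- abbreviations for the proofs (not used by the ports)
def pvKey (c : String) : Int × String :=
  ((if PySem.Str.lower c == "loss" then (0 : Int) else 1), PySem.Str.lower c)

def pvTag (c : String) : (Int × String) × String := (pvKey c, c)

def pvBefore (a b : String) : Bool :=
  decide ((pvKey a).1 < (pvKey b).1) ||
    (!decide ((pvKey b).1 < (pvKey a).1) && decide (PySem.Str.lower a < PySem.Str.lower b))

-- A's sorted2 comparator coincides with "NOT (key x ≤ key c)" used by B's scan
theorem pvBefore_eq_not_keyLe (c x : String) :
    pvBefore c x = !pvKeyLe (pvKey x) (pvKey c) := by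
  simp only [pvBefore, pvKey, pvKeyLe]
  by_cases hc : (PySem.Str.lower c == "loss") = true <;>
    by_cases hx : (PySem.Str.lower x == "loss") = true <;>
      simp [hc, hx, ← decide_not, not_le]

-- B's scan-and-insert on tagged pairs is insertBy with A's comparator on the names
theorem insertPair_eq_insertBy (c : String) (xs : List String) :
    pvInsertPair (pvKey c) c (xs.map pvTag)
      = (PySem.List.insertBy pvBefore c xs).map pvTag := by
  induction xs with
  | nil => rfl
  | cons x xs ih =>
    simp only [List.map_cons, pvInsertPair, PySem.List.insertBy, pvBefore_eq_not_keyLe c x]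
    cases h : pvKeyLe (pvKey x) (pvKey c) with
    | true => simp [pvTag, h, ih]
    | false => simp [pvTag, h]

-- B's loop over columns, on tagged state, is the guarded insertBy loop on names
theorem loopB_eq (columns : List String) (xs : List String) :
    columns.foldl (fun out c =>
      let lc := PySem.Str.lower c
      if PySem.Str.isIn "loss" lc then
        pvInsertPair ((if lc == "loss" then (0 : Int) else 1), lc) c out
      else out) (xs.map pvTag)
    = (columns.foldl (fun acc c =>
        if PySem.Str.isIn "loss" (PySem.Str.lower c) then PySem.List.insertBy pvBefore c acc
        else acc) xs).map pvTag := by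
  induction columns generalizing xs with
  | nil => rfl
  | cons c cs ih =>
    simp only [List.foldl_cons]
    have hins : pvInsertPair ((if PySem.Str.lower c == "loss" then (0 : Int) else 1),
        PySem.Str.lower c) c (xs.map pvTag)
        = (PySem.List.insertBy pvBefore c xs).map pvTag := insertPair_eq_insertBy c xs
    by_cases h : PySem.Str.isIn "loss" (PySem.Str.lower c) = true
    · rw [if_pos h, if_pos h, hins]
      exact ih _
    · rw [if_neg (by simp only [Bool.not_eq_true] at h; simp only [PySem.Str.isIn, String.reduceToList, PySem.Str.toList_lower] at h; simp [h]), if_neg (by simp only [Bool.not_eq_true] at h; simp only [PySem.Str.isIn, String.reduceToList, PySem.Str.toList_lower] at h; simp [h])]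
      exact ih xs

-- A's collecting loop is a filter by the combined condition
theorem loopA_eq_filter (columns : List String) (acc : List String) :
    columns.foldl (fun out c =>
      let lc := PySem.Str.lower c
      if lc == "loss" then out ++ [c]
      else if PySem.Str.isIn "loss" lc then out ++ [c]
      else out) acc
    = acc ++ columns.filter (fun c => PySem.Str.isIn "loss" (PySem.Str.lower c)) := by
  induction columns generalizing acc with
  | nil => simp
  | cons c cs ih =>
    simp only [List.foldl_cons]
    rw [ih, List.filter_cons]
    by_cases h : (PySem.Str.lower c == "loss") = true
    · have h' : PySem.Str.lower c = "loss" := by simpa using h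
      have hin : PySem.Str.isIn "loss" (PySem.Str.lower c) = true := by rw [h']; decide
      rw [h, hin]; simp
    · simp only [Bool.not_eq_true] at h
      by_cases hin : PySem.Str.isIn "loss" (PySem.Str.lower c) = true
      · rw [h, hin]; simp
      · simp only [Bool.not_eq_true] at hin
        rw [h, hin]; simp

-- the guarded insertBy loop over columns = plain insertBy loop over the filtered list
theorem guarded_eq_filtered (columns : List String) (acc : List String) :
    columns.foldl (fun acc c =>
      if PySem.Str.isIn "loss" (PySem.Str.lower c) then PySem.List.insertBy pvBefore c acc
      else acc) acc
    = (columns.filter (fun c => PySem.Str.isIn "loss" (PySem.Str.lower c))).foldl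
        (fun acc c => PySem.List.insertBy pvBefore c acc) acc := by
  induction columns generalizing acc with
  | nil => rfl
  | cons c cs ih =>
    simp only [List.foldl_cons, List.filter_cons]
    by_cases h : PySem.Str.isIn "loss" (PySem.Str.lower c) = true
    · rw [if_pos h, if_pos h]
      rw [ih]
      simp
    · rw [if_neg (by simp only [Bool.not_eq_true] at h; simp only [PySem.Str.isIn, String.reduceToList, PySem.Str.toList_lower] at h; simp [h]), if_neg (by simp only [Bool.not_eq_true] at h; simp only [PySem.Str.isIn, String.reduceToList, PySem.Str.toList_lower] at h; simp [h])]
      exact ih acc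

-- ===== VERDICT (by name: the statement is the Claim_ definition above) =====
theorem loss_columns_py_spec : Claim_equal_loss_columns_py := by
  intro columns _
  show loss_columns_py columns = loss_columns_py_alt columns
  unfold loss_columns_py loss_columns_py_alt
  rw [loopA_eq_filter columns []]
  have hB := loopB_eq columns []
  simp only [List.map_nil] at hB
  simp only [hB]
  rw [guarded_eq_filtered columns []]
  have h2 : PySem.List.sorted2
      (columns.filter (fun c => PySem.Str.isIn "loss" (PySem.Str.lower c)))
      (fun x => if PySem.Str.lower x == "loss" then (0 : Int) else 1)
      (fun x => PySem.Str.lower x)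
      = (columns.filter (fun c => PySem.Str.isIn "loss" (PySem.Str.lower c))).foldl
          (fun acc x => PySem.List.insertBy pvBefore x acc) [] := rfl
  simp only [List.nil_append, h2, List.map_map]
  have : Prod.snd ∘ pvTag = id := by funext c; rfl
  rw [this, List.map_id]
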